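-- pv_equiv track=rewrite | github.com/coah80/talkmodachi-bot | talkmodachi_bot/message_cleaner.py | clamp_repeated_characters
-- ===== SOURCE A (Python) =====
-- def clamp_repeated_characters(text: str, limit: int | None) -> str:
--     if not limit or limit < 1:
--         return text
--     out: list[str] = []
--     previous = ""
--     count = 0
--     for char in text:
--         if char == previous:
--             count += 1
--         else:
--             previous = char
--             count = 1
--         if count <= limit:
--             out.append(char)
--     return "".join(out)
-- ===== SOURCE B (Python) =====
-- def clamp_repeated_characters(text: str, limit: int | None) -> str:
--     if not limit or limit < 1:
--         return text
--     parts: list[str] = []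
--     i = 0
--     n = len(text)
--     while i < n:
--         j = i
--         while j < n and text[j] == text[i]:
--             j += 1
--         parts.append(text[i] * min(j - i, limit))
--         i = j
--     return "".join(parts)
-- ===== Notes on version B (the rewrite author's own statement) =====
-- stated objective: alternative
-- what changed: Instead of a flat per-character loop maintaining previous/count state, B scans each maximal run of identical characters with an inner loop and emits char * min(run_length, limit) per run.
import Mathlib
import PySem

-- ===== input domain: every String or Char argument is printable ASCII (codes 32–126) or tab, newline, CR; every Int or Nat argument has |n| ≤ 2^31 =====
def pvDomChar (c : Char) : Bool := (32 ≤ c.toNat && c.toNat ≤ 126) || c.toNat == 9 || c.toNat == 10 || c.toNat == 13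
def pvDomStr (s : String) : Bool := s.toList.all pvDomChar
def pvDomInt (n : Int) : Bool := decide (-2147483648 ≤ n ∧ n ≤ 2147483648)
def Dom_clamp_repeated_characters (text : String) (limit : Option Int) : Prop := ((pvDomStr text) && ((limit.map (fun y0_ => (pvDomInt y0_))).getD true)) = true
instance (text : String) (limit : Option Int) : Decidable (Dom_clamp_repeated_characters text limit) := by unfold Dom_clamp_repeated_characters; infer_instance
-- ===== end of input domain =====

-- B restructures A's flat per-character previous/count loop into a run scanner: an inner
-- loop finds each maximal run of identical characters, and char * min(run_length, limit)
-- is emitted per run. Same return value everywhere; neither version mutates its arguments.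

-- ===== PORT A =====
-- Python's `previous` starts as "" which equals no single character; ported exactly as `none`.
-- One loop step: compare with previous, update count, append char when count <= limit.
def pvStepA (l : Int) (st : List Char × Option Char × Int) (c : Char) : List Char × Option Char × Int :=
  let out := st.1
  let prev := st.2.1
  let count := st.2.2
  let prev' := if prev = some c then prev else some c
  let count' := if prev = some c then count + 1 else 1
  (if count' ≤ l then out ++ [c] else out, prev', count')

def clamp_repeated_characters (text : String) (limit : Option Int) : String :=
  match limit with
  | none => text                                  -- `not limit` (None)
  | some l =>
    if l = 0 then text                            -- `not limit` (0)
    else if l < 1 then text                       -- `limit < 1`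
    else String.mk (List.foldl (pvStepA l) ([], none, 0) text.toList).1

-- ===== PORT B =====
-- Inner while loop of Source B: advance j over the run of the current character;
-- returns (run length past the head position, rest of the list).
def pvTakeRun (c : Char) : List Char → Nat × List Char
  | [] => (0, [])
  | x :: xs => if x = c then let r := pvTakeRun c xs; (r.1 + 1, r.2) else (0, x :: xs)

theorem pvTakeRun_len (c : Char) (xs : List Char) : (pvTakeRun c xs).2.length ≤ xs.length := by
  induction xs with
  | nil => simp [pvTakeRun]
  | cons x xs ih => by_cases h : x = c <;> simp [pvTakeRun, h] <;> omega

-- Outer while loop of Source B: per maximal run emit char * min(run_length, limit).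
def pvEmit (l : Int) : List Char → List Char
  | [] => []
  | c :: cs =>
    let r := pvTakeRun c cs
    List.replicate (min ((r.1 : Int) + 1) l).toNat c ++ pvEmit l r.2
termination_by cs => cs.length
decreasing_by
  have := pvTakeRun_len c cs
  simp only [List.length_cons]
  omega

def clamp_repeated_characters_alt (text : String) (limit : Option Int) : String :=
  match limit with
  | none => text
  | some l =>
    if l = 0 then text
    else if l < 1 then text
    else String.mk (pvEmit l text.toList)

-- ===== PRECONDITION & SPEC =====
def Spec_clamp_repeated_characters (text : String) (limit : Option Int) (out : String) : Prop := out = clamp_repeated_characters_alt text limit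
instance (text : String) (limit : Option Int) (out : String) : Decidable (Spec_clamp_repeated_characters text limit out) := by unfold Spec_clamp_repeated_characters; infer_instance

-- ===== CLAIM (what is proved, stated in full; the proofs are below) =====
def Claim_equal_clamp_repeated_characters : Prop := ∀ (text : String) (limit : Option Int), Dom_clamp_repeated_characters text limit → Spec_clamp_repeated_characters text limit (clamp_repeated_characters text limit)

-- ===== LEMMAS AND PROOFS =====

theorem pvEmit_nil (l : Int) : pvEmit l [] = [] := by rw [pvEmit]

theorem pvEmit_cons (l : Int) (c : Char) (cs : List Char) :
    pvEmit l (c :: cs) =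
      List.replicate (min (((pvTakeRun c cs).1 : Int) + 1) l).toNat c ++ pvEmit l (pvTakeRun c cs).2 := by
  rw [pvEmit]

-- Recursive characterization of A's loop output (dropping the accumulator).
def pvRecA (l : Int) : List Char → Option Char → Int → List Char
  | [], _, _ => []
  | c :: cs, prev, count =>
    let count' := if prev = some c then count + 1 else 1
    (if count' ≤ l then [c] else []) ++ pvRecA l cs (some c) count'

theorem pvFoldA_recA (l : Int) (cs : List Char) :
    ∀ (out : List Char) (prev : Option Char) (count : Int),
      (List.foldl (pvStepA l) (out, prev, count) cs).1 = out ++ pvRecA l cs prev count := by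
  induction cs with
  | nil => intro out prev count; simp [pvRecA]
  | cons c cs ih =>
    intro out prev count
    by_cases h : prev = some c <;> simp [pvStepA, pvRecA, h, ih] <;> split <;> simp

theorem pvRepHelper (a b c' : Nat) (x : Char) (t : List Char) (h : a + b = c') :
    List.replicate a x ++ (List.replicate b x ++ t) = List.replicate c' x ++ t := by
  rw [← h, List.replicate_add, List.append_assoc]

-- Consuming the remainder of a run of c, with the count already at k, emits
-- min (k + n) l - min k l further copies of c, then continues per-run.
theorem pvRecA_run (l : Int) (hl : 1 ≤ l) (cs : List Char) :
    ∀ (c : Char) (k : Int), 1 ≤ k →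
      pvRecA l cs (some c) k =
        List.replicate ((min (k + (pvTakeRun c cs).1) l) - min k l).toNat c
          ++ pvEmit l (pvTakeRun c cs).2 := by
  induction cs with
  | nil => intro c k hk; simp [pvRecA, pvTakeRun, pvEmit_nil]
  | cons x xs ih =>
    intro c k hk
    by_cases h : x = c
    · subst h
      have ih' := ih x (k + 1) (by omega)
      simp [pvRecA, pvTakeRun, ih']
      by_cases h2 : k < l
      · rw [if_pos h2, show [x] = List.replicate 1 x from rfl]
        exact pvRepHelper 1 _ _ x _ (by omega)
      · rw [if_neg h2, List.nil_append]
        rw [show (min (k + 1 + ((pvTakeRun x xs).1 : Int)) l - min (k + 1) l).toNat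
              = (min (k + (((pvTakeRun x xs).1 : Int) + 1)) l - min k l).toNat from by omega]
    · have hcx : ¬ c = x := fun e => h e.symm
      simp [pvRecA, pvTakeRun, h, hcx, hl, pvEmit_cons, ih x 1 (le_refl 1)]
      exact pvRepHelper 1 _ _ x _ (by omega)

theorem pvRecA_emit (l : Int) (hl : 1 ≤ l) (cs : List Char) :
    pvRecA l cs none 0 = pvEmit l cs := by
  cases cs with
  | nil => simp [pvRecA, pvEmit_nil]
  | cons c cs =>
    simp [pvRecA, hl, pvRecA_run l hl cs c 1 (le_refl 1), pvEmit_cons]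
    exact pvRepHelper 1 _ _ c _ (by omega)

-- ===== VERDICT (by name: the statement is the Claim_ definition above) =====
theorem clamp_repeated_characters_spec : Claim_equal_clamp_repeated_characters := by
  intro text limit _
  unfold Spec_clamp_repeated_characters clamp_repeated_characters clamp_repeated_characters_alt
  cases limit with
  | none => rfl
  | some l =>
    by_cases h0 : l = 0
    · simp [h0]
    · by_cases h1 : l < 1
      · simp [h0, h1]
      · simp only [h0, h1, if_false]
        rw [pvFoldA_recA, pvRecA_emit l (by omega)]
        simp
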